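-- pv_equiv track=rewrite | github.com/jere344/les-secrets-d-ambres | institute/management/commands/seed.py | _parse_style_declarations
-- ===== SOURCE A (Python) =====
-- def _parse_style_declarations(style_text):
--     style_map = {}
--     for chunk in str(style_text or "").split(";"):
--         if ":" not in chunk:
--             continue
--         key, value = chunk.split(":", 1)
--         key = key.strip().lower()
--         value = value.strip()
--         if key and value:
--             style_map[key] = value
--     return style_map
-- ===== SOURCE B (Python) =====
-- def _parse_style_declarations(style_text):
--     style_map = {}
--     key_buf = []
--     val_buf = []
--     in_value = False
--     for ch in str(style_text or ""):
--         if ch == ";":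
--             if in_value:
--                 key = "".join(key_buf).strip().lower()
--                 value = "".join(val_buf).strip()
--                 if key and value:
--                     style_map[key] = value
--             key_buf = []
--             val_buf = []
--             in_value = False
--         elif ch == ":" and not in_value:
--             in_value = True
--         elif in_value:
--             val_buf.append(ch)
--         else:
--             key_buf.append(ch)
--     if in_value:
--         key = "".join(key_buf).strip().lower()
--         value = "".join(val_buf).strip()
--         if key and value:
--             style_map[key] = value
--     return style_map
-- ===== Notes on version B (the rewrite author's own statement) =====
-- stated objective: alternative
-- what changed: Replaced A's split-on-';' pass followed by a per-chunk split(':',1) with a single left-to-right character scan that maintains key/value buffers and an in_value flag, flushing a declaration at each ';' and at end of input.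
import Mathlib
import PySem

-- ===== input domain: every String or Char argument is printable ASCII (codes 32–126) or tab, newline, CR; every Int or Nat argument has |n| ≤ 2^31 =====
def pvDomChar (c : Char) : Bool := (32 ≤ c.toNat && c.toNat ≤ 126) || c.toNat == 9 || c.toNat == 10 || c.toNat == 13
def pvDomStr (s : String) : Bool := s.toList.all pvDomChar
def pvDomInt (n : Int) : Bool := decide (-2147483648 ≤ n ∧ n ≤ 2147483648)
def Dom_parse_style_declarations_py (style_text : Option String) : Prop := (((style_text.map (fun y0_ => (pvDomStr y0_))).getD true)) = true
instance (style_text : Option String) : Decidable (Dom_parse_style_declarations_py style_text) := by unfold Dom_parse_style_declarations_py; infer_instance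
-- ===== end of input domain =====

-- B replaces A's split-on-';' / split-on-':' passes by a single character scan with key/value
-- buffers and an in_value flag (objective: alternative single-pass algorithm, same result).

-- ===== PORT A =====
-- `str(style_text or "")`: None gives "", and for a string `or` returns it unchanged ("" stays ""),
-- so this is `style_text.getD ""`. `if ":" not in chunk: continue` is written as the positive guard.
def parse_style_declarations_py (style_text : Option String) : List (String × String) :=
  ((PySem.Chars.splitOn (style_text.getD "").toList [';']).foldl
    (fun (d : PySem.Dict String String) chunk =>
      if PySem.Chars.isIn [':'] chunk = true then
        -- `key, value = chunk.split(":", 1)`: under the guard the split has exactly two parts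
        match PySem.Chars.splitOnMax chunk [':'] 1 with
        | key :: value :: _ =>
          let key := PySem.Chars.lower (PySem.Chars.strip key)
          let value := PySem.Chars.strip value
          if key ≠ [] ∧ value ≠ [] then d.insert (String.ofList key) (String.ofList value) else d
        | _ => d
      else d)
    PySem.Dict.empty).items

-- ===== PORT B =====
-- flush one accumulated declaration (the `if in_value: … style_map[key] = value` block of Source B)
def pvFlushB (d : PySem.Dict String String) (k v : List Char) (seen : Bool) :
    PySem.Dict String String :=
  if seen then
    let key := PySem.Chars.lower (PySem.Chars.strip k)
    let value := PySem.Chars.strip v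
    if key ≠ [] ∧ value ≠ [] then d.insert (String.ofList key) (String.ofList value) else d
  else d

-- the character loop of Source B (key_buf, val_buf, in_value), final flush at the end
def pvScanB : List Char → PySem.Dict String String → List Char → List Char → Bool →
    PySem.Dict String String
  | [], d, k, v, seen => pvFlushB d k v seen
  | c :: cs, d, k, v, seen =>
    if c = ';' then pvScanB cs (pvFlushB d k v seen) [] [] false
    else if c = ':' ∧ seen = false then pvScanB cs d k v true
    else if seen then pvScanB cs d k (v ++ [c]) seen
    else pvScanB cs d (k ++ [c]) v seen

def parse_style_declarations_py_alt (style_text : Option String) : List (String × String) :=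
  (pvScanB (style_text.getD "").toList PySem.Dict.empty [] [] false).items

-- ===== PRECONDITION & SPEC =====
def Spec_parse_style_declarations_py (style_text : Option String) (out : List (String × String)) : Prop := out = parse_style_declarations_py_alt style_text
instance (style_text : Option String) (out : List (String × String)) : Decidable (Spec_parse_style_declarations_py style_text out) := by unfold Spec_parse_style_declarations_py; infer_instance

-- ===== CLAIM (what is proved, stated in full; the proofs are below) =====
def Claim_equal_parse_style_declarations_py : Prop := ∀ (style_text : Option String), Dom_parse_style_declarations_py style_text → Spec_parse_style_declarations_py style_text (parse_style_declarations_py style_text)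

-- ===== LEMMAS AND PROOFS =====

-- A's per-chunk fold body, named so that the two sides can be compared chunk by chunk
def pvStepA (d : PySem.Dict String String) (chunk : List Char) : PySem.Dict String String :=
  if PySem.Chars.isIn [':'] chunk = true then
    match PySem.Chars.splitOnMax chunk [':'] 1 with
    | key :: value :: _ =>
      let key := PySem.Chars.lower (PySem.Chars.strip key)
      let value := PySem.Chars.strip value
      if key ≠ [] ∧ value ≠ [] then d.insert (String.ofList key) (String.ofList value) else d
    | _ => d
  else d

-- split at the first ':': (part before, rest after it if any)
def pvColsplit : List Char → List Char × Option (List Char)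
  | [] => ([], none)
  | c :: cs => if c = ':' then ([], some cs) else ((pvColsplit cs).1.cons c, (pvColsplit cs).2)

-- closed form of splitting on ';'
def pvSplitSemi : List Char → List (List Char)
  | [] => [[]]
  | c :: cs =>
    if c = ';' then [] :: pvSplitSemi cs
    else match pvSplitSemi cs with
      | [] => [[c]]
      | p :: ps => (c :: p) :: ps

-- the buffer state B reaches after scanning a ';'-free chunk
def pvConsume : List Char → List Char → List Char → Bool → List Char × List Char × Bool
  | [], k, v, seen => (k, v, seen)
  | c :: cs, k, v, seen =>
    if c = ':' ∧ seen = false then pvConsume cs k v true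
    else if seen then pvConsume cs k (v ++ [c]) seen
    else pvConsume cs (k ++ [c]) v seen

theorem pvSplitSemi_ne_nil (s : List Char) : pvSplitSemi s ≠ [] := by
  cases s with
  | nil => simp [pvSplitSemi]
  | cons c cs =>
    simp only [pvSplitSemi]
    split
    · simp
    · split <;> simp

theorem pvGoSemi' (fuel : Nat) : ∀ (l cur : List Char) (acc : List (List Char)),
    l.length < fuel →
    PySem.Chars.splitOn.go [';'] fuel l cur acc =
      acc.reverse ++ (match pvSplitSemi l with
        | [] => []
        | p :: ps => (cur.reverse ++ p) :: ps) := by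
  induction fuel with
  | zero => intro l cur acc h; omega
  | succ fuel ih =>
    intro l cur acc h
    cases l with
    | nil => simp [PySem.Chars.splitOn.go, pvSplitSemi]
    | cons c rest =>
      by_cases hc : c = ';'
      · subst hc
        rw [PySem.Chars.splitOn.go]
        simp only [List.isPrefixOf, BEq.rfl, Bool.true_and, if_true,
          List.length_cons, List.drop_succ_cons, List.length_nil, List.drop_zero]
        rw [ih rest [] (List.reverse cur :: acc) (by simpa using Nat.lt_of_succ_lt_succ h)]
        cases hs : pvSplitSemi rest with
        | nil => exact absurd hs (pvSplitSemi_ne_nil rest)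
        | cons p ps => simp [pvSplitSemi, hs]
      · rw [PySem.Chars.splitOn.go]
        have : List.isPrefixOf [';'] (c :: rest) = false := by
          simp [List.isPrefixOf]; exact fun h' => (hc h'.symm).elim
        simp only [this, if_false]
        rw [ih rest (c :: cur) acc (by simpa using Nat.lt_of_succ_lt_succ h)]
        cases hs : pvSplitSemi rest with
        | nil => exact absurd hs (pvSplitSemi_ne_nil rest)
        | cons p ps => simp [pvSplitSemi, hc, hs]

theorem pvSplitOn_eq (s : List Char) : PySem.Chars.splitOn s [';'] = pvSplitSemi s := by
  unfold PySem.Chars.splitOn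
  rw [pvGoSemi' (s.length + 1) s [] [] (by omega)]
  cases hs : pvSplitSemi s with
  | nil => exact absurd hs (pvSplitSemi_ne_nil s)
  | cons p ps => simp

theorem pvGoMax0 (fuel : Nat) (l cur : List Char) (acc : List (List Char)) :
    PySem.Chars.splitOnMax.go [':'] fuel 0 l cur acc = acc.reverse ++ [cur.reverse ++ l] := by
  cases fuel with
  | zero => rw [PySem.Chars.splitOnMax.go]; simp
  | succ fuel =>
    cases l with
    | nil => rw [PySem.Chars.splitOnMax.go]; simp; omega
    | cons c rest => rw [PySem.Chars.splitOnMax.go]; simp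

theorem pvGoMax1 (fuel : Nat) : ∀ (l cur : List Char) (acc : List (List Char)),
    l.length < fuel →
    PySem.Chars.splitOnMax.go [':'] fuel 1 l cur acc =
      acc.reverse ++ (match pvColsplit l with
        | (p, none) => [cur.reverse ++ p]
        | (p, some r) => [cur.reverse ++ p, r]) := by
  induction fuel with
  | zero => intro l cur acc h; omega
  | succ fuel ih =>
    intro l cur acc h
    cases l with
    | nil => rw [PySem.Chars.splitOnMax.go]; simp [pvColsplit]; omega
    | cons c rest =>
      by_cases hc : c = ':'
      · subst hc
        rw [PySem.Chars.splitOnMax.go]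
        simp only [List.isPrefixOf, BEq.rfl, Bool.true_and, if_true,
          List.length_cons, List.drop_succ_cons, List.length_nil, List.drop_zero]
        norm_num
        rw [pvGoMax0]
        simp [pvColsplit]
      · rw [PySem.Chars.splitOnMax.go]
        have hp : List.isPrefixOf [':'] (c :: rest) = false := by
          simp [List.isPrefixOf]; exact fun h' => (hc h'.symm).elim
        simp only [hp, if_false]
        norm_num
        rw [ih rest (c :: cur) acc (by simpa using Nat.lt_of_succ_lt_succ h)]
        cases hr : pvColsplit rest with
        | mk p o => cases o <;> simp [pvColsplit, hc, hr]

theorem pvSplitOnMax_eq (s : List Char) :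
    PySem.Chars.splitOnMax s [':'] 1 =
      (match pvColsplit s with
        | (p, none) => [p]
        | (p, some r) => [p, r]) := by
  unfold PySem.Chars.splitOnMax
  rw [if_neg (by norm_num)]
  rw [show (1 : Int).toNat = 1 from rfl]
  rw [pvGoMax1 (s.length + 1) s [] [] (by omega)]
  cases hr : pvColsplit s with
  | mk p o => cases o <;> simp

theorem pvColsplit_none_iff (s : List Char) : (pvColsplit s).2 = none ↔ ':' ∉ s := by
  induction s with
  | nil => simp [pvColsplit]
  | cons c cs ih =>
    by_cases hc : c = ':'
    · subst hc; simp [pvColsplit]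
    · simp [pvColsplit, hc, Ne.symm hc, ih]

theorem pvIsIn_colon (s : List Char) : PySem.Chars.isIn [':'] s = true ↔ ':' ∈ s := by
  rw [PySem.Chars.isIn_iff_infix]
  constructor
  · intro h; exact h.mem (by simp)
  · intro h
    obtain ⟨l, r, hlr⟩ := List.append_of_mem h
    exact ⟨l, r, by simp [hlr]⟩

theorem pvConsume_seen : ∀ (cs k v : List Char), pvConsume cs k v true = (k, v ++ cs, true) := by
  intro cs
  induction cs with
  | nil => simp [pvConsume]
  | cons c cs ih => intro k v; simp [pvConsume, ih]

theorem pvConsume_false : ∀ (cs k : List Char),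
    pvConsume cs k [] false =
      (match pvColsplit cs with
        | (p, none) => (k ++ p, [], false)
        | (p, some r) => (k ++ p, r, true)) := by
  intro cs
  induction cs with
  | nil => simp [pvConsume, pvColsplit]
  | cons c cs ih =>
    intro k
    by_cases hc : c = ':'
    · subst hc
      simp [pvConsume, pvColsplit, pvConsume_seen]
    · rw [show pvConsume (c :: cs) k [] false = pvConsume cs (k ++ [c]) [] false by
        simp [pvConsume, hc]]
      rw [ih (k ++ [c])]
      cases hr : pvColsplit cs with
      | mk p o => cases o <;> simp [pvColsplit, hc, hr]

theorem pvScan_noSemi : ∀ (cs : List Char) (d : PySem.Dict String String)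
    (k v : List Char) (seen : Bool), ';' ∉ cs →
    pvScanB cs d k v seen =
      pvFlushB d (pvConsume cs k v seen).1 (pvConsume cs k v seen).2.1
        (pvConsume cs k v seen).2.2 := by
  intro cs
  induction cs with
  | nil => intro d k v seen _; simp [pvScanB, pvConsume]
  | cons c cs ih =>
    intro d k v seen h
    have hc : ¬ c = ';' := fun hc => h (by simp [hc])
    have hcs : ';' ∉ cs := fun hm => h (by simp [hm])
    cases seen with
    | true =>
      rw [show pvScanB (c :: cs) d k v true = pvScanB cs d k (v ++ [c]) true by
        simp [pvScanB, hc]]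
      rw [show pvConsume (c :: cs) k v true = pvConsume cs k (v ++ [c]) true by
        simp [pvConsume]]
      exact ih d k (v ++ [c]) true hcs
    | false =>
      by_cases h1 : c = ':'
      · rw [show pvScanB (c :: cs) d k v false = pvScanB cs d k v true by
          simp [pvScanB, hc, h1]]
        rw [show pvConsume (c :: cs) k v false = pvConsume cs k v true by
          simp [pvConsume, h1]]
        exact ih d k v true hcs
      · rw [show pvScanB (c :: cs) d k v false = pvScanB cs d (k ++ [c]) v false by
          simp [pvScanB, hc, h1]]
        rw [show pvConsume (c :: cs) k v false = pvConsume cs (k ++ [c]) v false by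
          simp [pvConsume, h1]]
        exact ih d (k ++ [c]) v false hcs

theorem pvScan_semi : ∀ (cs rest : List Char) (d : PySem.Dict String String)
    (k v : List Char) (seen : Bool), ';' ∉ cs →
    pvScanB (cs ++ ';' :: rest) d k v seen =
      pvScanB rest
        (pvFlushB d (pvConsume cs k v seen).1 (pvConsume cs k v seen).2.1
          (pvConsume cs k v seen).2.2) [] [] false := by
  intro cs
  induction cs with
  | nil => intro rest d k v seen _; simp [pvScanB, pvConsume]
  | cons c cs ih =>
    intro rest d k v seen h
    have hc : ¬ c = ';' := fun hc => h (by simp [hc])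
    have hcs : ';' ∉ cs := fun hm => h (by simp [hm])
    cases seen with
    | true =>
      rw [show pvScanB ((c :: cs) ++ ';' :: rest) d k v true
          = pvScanB (cs ++ ';' :: rest) d k (v ++ [c]) true by simp [pvScanB, hc]]
      rw [show pvConsume (c :: cs) k v true = pvConsume cs k (v ++ [c]) true by
        simp [pvConsume]]
      exact ih rest d k (v ++ [c]) true hcs
    | false =>
      by_cases h1 : c = ':'
      · rw [show pvScanB ((c :: cs) ++ ';' :: rest) d k v false
            = pvScanB (cs ++ ';' :: rest) d k v true by simp [pvScanB, hc, h1]]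
        rw [show pvConsume (c :: cs) k v false = pvConsume cs k v true by
          simp [pvConsume, h1]]
        exact ih rest d k v true hcs
      · rw [show pvScanB ((c :: cs) ++ ';' :: rest) d k v false
            = pvScanB (cs ++ ';' :: rest) d (k ++ [c]) v false by simp [pvScanB, hc, h1]]
        rw [show pvConsume (c :: cs) k v false = pvConsume cs (k ++ [c]) v false by
          simp [pvConsume, h1]]
        exact ih rest d (k ++ [c]) v false hcs

-- A's chunk step is exactly "consume the chunk, then flush"
theorem pvStep_eq (d : PySem.Dict String String) (chunk : List Char) :
    pvStepA d chunk =
      pvFlushB d (pvConsume chunk [] [] false).1 (pvConsume chunk [] [] false).2.1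
        (pvConsume chunk [] [] false).2.2 := by
  rw [pvConsume_false chunk []]
  cases hr : pvColsplit chunk with
  | mk p o =>
    cases o with
    | none =>
      have hni : ':' ∉ chunk := (pvColsplit_none_iff chunk).mp (by rw [hr])
      have : PySem.Chars.isIn [':'] chunk = false := by
        cases h : PySem.Chars.isIn [':'] chunk
        · rfl
        · exact absurd ((pvIsIn_colon chunk).mp h) hni
      simp [pvStepA, pvFlushB, this]
    | some r =>
      have hmem : ':' ∈ chunk := by
        by_contra hni
        have := (pvColsplit_none_iff chunk).mpr hni
        rw [hr] at this; simp at this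
      have hin : PySem.Chars.isIn [':'] chunk = true := (pvIsIn_colon chunk).mpr hmem
      rw [pvStepA, if_pos hin, pvSplitOnMax_eq, hr]
      simp [pvFlushB]

theorem pvSplitSemi_noSemi (s : List Char) (h : ';' ∉ s) : pvSplitSemi s = [s] := by
  induction s with
  | nil => simp [pvSplitSemi]
  | cons c cs ih =>
    have hc : ¬ c = ';' := fun hc => h (by simp [hc])
    have hcs : ';' ∉ cs := fun hm => h (by simp [hm])
    simp [pvSplitSemi, hc, ih hcs]

theorem pvSplitSemi_append (pre rest : List Char) (h : ';' ∉ pre) :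
    pvSplitSemi (pre ++ ';' :: rest) = pre :: pvSplitSemi rest := by
  induction pre with
  | nil => simp [pvSplitSemi]
  | cons c cs ih =>
    have hc : ¬ c = ';' := fun hc => h (by simp [hc])
    have hcs : ';' ∉ cs := fun hm => h (by simp [hm])
    rw [List.cons_append, pvSplitSemi]
    rw [ih hcs]
    simp [hc]

theorem pvDropWhile_head (p : Char → Bool) : ∀ (s : List Char) (c : Char) (rest : List Char),
    List.dropWhile p s = c :: rest → p c = false := by
  intro s
  induction s with
  | nil => intro c rest h; simp [List.dropWhile] at h
  | cons a as ih =>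
    intro c rest h
    by_cases hp : p a
    · rw [List.dropWhile_cons_of_pos hp] at h; exact ih _ _ h
    · rw [List.dropWhile_cons_of_neg hp] at h
      cases h
      simpa using hp

theorem pvMainAux : ∀ (n : Nat) (s : List Char), s.length ≤ n → ∀ d,
    pvScanB s d [] [] false = (pvSplitSemi s).foldl pvStepA d := by
  intro n
  induction n with
  | zero =>
    intro s hs d
    have : s = [] := List.eq_nil_of_length_eq_zero (Nat.le_zero.mp hs)
    subst this
    rw [pvScan_noSemi [] d [] [] false (by simp), pvSplitSemi_noSemi [] (by simp)]
    rw [List.foldl_cons, List.foldl_nil, pvStep_eq]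
  | succ n ih =>
    intro s hs d
    by_cases h : ';' ∈ s
    · -- s = pre ++ ';' :: rest with ';' ∉ pre
      set p : Char → Bool := fun c => !(c == ';') with hp
      set pre : List Char := s.takeWhile p with hpre_def
      have hsplit : pre ++ s.dropWhile p = s := List.takeWhile_append_dropWhile
      have hdne : s.dropWhile p ≠ [] := by
        intro hnil
        have hall : ∀ x ∈ s, p x = true := by
          intro x hx
          rw [← hsplit] at hx
          rcases List.mem_append.mp hx with hx | hx
          · exact List.mem_takeWhile_imp hx
          · rw [hnil] at hx; simp at hx
        have := hall ';' h
        simp [hp] at this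
      obtain ⟨c, rest, hd⟩ := List.exists_cons_of_ne_nil hdne
      have hchead : p c = false := pvDropWhile_head p s c rest hd
      have hcsemi : c = ';' := by simpa [hp] using hchead
      subst hcsemi
      have hpre : ';' ∉ pre := by
        intro hm
        have := List.mem_takeWhile_imp hm
        simp [hp] at this
      have hseq : s = pre ++ ';' :: rest := by rw [← hsplit, hd]
      have hlen : rest.length ≤ n := by
        have := congrArg List.length hseq
        simp at this
        omega
      rw [hseq, pvScan_semi pre rest d [] [] false hpre, pvSplitSemi_append pre rest hpre]
      rw [List.foldl_cons, pvStep_eq]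
      exact ih rest hlen _
    · rw [pvScan_noSemi s d [] [] false h, pvSplitSemi_noSemi s h]
      rw [List.foldl_cons, List.foldl_nil, pvStep_eq]

-- ===== VERDICT (by name: the statement is the Claim_ definition above) =====
theorem parse_style_declarations_py_spec : Claim_equal_parse_style_declarations_py := by
  intro style_text _
  show parse_style_declarations_py style_text = parse_style_declarations_py_alt style_text
  unfold parse_style_declarations_py parse_style_declarations_py_alt
  rw [pvSplitOn_eq]
  rw [pvMainAux ((style_text.getD "").toList).length _ le_rfl PySem.Dict.empty]
  rfl
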